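-- pv_equiv track=rewrite | github.com/lilitmovsesian/vut-fit-ipp-1project-2023-2024 | lib_stats.py | count_forward_jumps
-- ===== SOURCE A (Python) =====
-- def count_forward_jumps(source_code):
--     """Calculation of jumps to label which are defined later in source code"""
--     instructions = ["CALL", "JUMP", "JUMPIFEQ", "JUMPIFNEQ"]
--     count = 0
--     # Iterates through lines, when a jump is encountered
--     # searches for a target label in subsequent lines
--     for i, line in enumerate(source_code):
--         tokens = line.split()
--         if tokens and tokens[0] in instructions:
--             instruction_label = tokens[1]
--             for next_line in source_code[i+1:]:
--                 if next_line.strip().startswith("LABEL"):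
--                     label_name = next_line.strip().split()[1]
--                     if instruction_label == label_name:
--                         count += 1
--                         break
--     return count
-- ===== SOURCE B (Python) =====
-- def count_forward_jumps(source_code):
--     """Calculation of jumps to label which are defined later in source code"""
--     instructions = ["CALL", "JUMP", "JUMPIFEQ", "JUMPIFNEQ"]
--     count = 0
--     later_labels = set()
--     # Single reverse pass: later_labels holds the names of labels defined
--     # strictly after the current line; a jump counts iff its target is there.
--     for line in reversed(source_code):
--         tokens = line.split()
--         if tokens and tokens[0] in instructions and tokens[1] in later_labels:
--             count += 1
--         parts = line.strip().split()
--         if line.strip().startswith("LABEL") and len(parts) > 1: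
--             later_labels.add(parts[1])
--     return count
-- ===== Notes on version B (the rewrite author's own statement) =====
-- stated objective: alternative
-- what changed: Replaces the nested forward rescan (for each jump, scan all subsequent lines for a matching LABEL) with a single reverse pass that accumulates the set of label names defined later and counts a jump iff its target is in that set.
import Mathlib
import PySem

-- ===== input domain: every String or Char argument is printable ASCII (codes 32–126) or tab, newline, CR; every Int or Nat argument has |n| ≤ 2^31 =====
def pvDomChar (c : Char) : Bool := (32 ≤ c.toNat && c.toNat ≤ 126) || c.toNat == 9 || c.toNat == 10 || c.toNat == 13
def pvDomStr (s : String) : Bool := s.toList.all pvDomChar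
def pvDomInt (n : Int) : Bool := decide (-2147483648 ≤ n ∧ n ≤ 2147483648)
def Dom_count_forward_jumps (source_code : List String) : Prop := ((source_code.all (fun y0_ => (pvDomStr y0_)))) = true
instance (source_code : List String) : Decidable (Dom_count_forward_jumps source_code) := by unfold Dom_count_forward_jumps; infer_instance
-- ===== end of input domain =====

-- B replaces A's nested forward rescan by a single reverse pass keeping a set of the
-- label names seen later; objective: alternative (one pass instead of nested scans).

-- ===== PORT A =====
def pvInstrsA : List String := ["CALL", "JUMP", "JUMPIFEQ", "JUMPIFNEQ"]

-- A's inner loop: scan the suffix for the first LABEL line whose name matches, then break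
def pvInnerA (instruction_label : String) : List String → Int → Int
  | [], count => count
  | next_line :: rest, count =>
    if PySem.Str.startswith (PySem.Str.strip next_line) "LABEL" then
      if instruction_label == (PySem.List.pyGet? (PySem.Str.split₀ (PySem.Str.strip next_line)) 1).getD "" then
        count + 1
      else pvInnerA instruction_label rest count
    else pvInnerA instruction_label rest count

def count_forward_jumps (source_code : List String) : Int :=
  (PySem.List.enumerate source_code 0).foldl (fun count p =>
    -- tokens = p.2.split(); "if tokens and tokens[0] in instructions"
    if PySem.Str.split₀ p.2 ≠ [] ∧ (PySem.Str.split₀ p.2).headD "" ∈ pvInstrsA then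
      pvInnerA ((PySem.List.pyGet? (PySem.Str.split₀ p.2) 1).getD "")
        (PySem.List.slice source_code (some (p.1 + 1)) none) count
    else count) 0

-- ===== PORT B =====
def pvInstrsB : List String := ["CALL", "JUMP", "JUMPIFEQ", "JUMPIFNEQ"]

-- "if tokens and tokens[0] in instructions and tokens[1] in later_labels: count += 1"
def pvCountB (st : PySem.Set String × Int) (line : String) : PySem.Set String × Int :=
  if PySem.Str.split₀ line ≠ [] ∧ (PySem.Str.split₀ line).headD "" ∈ pvInstrsB ∧
      PySem.Set.contains st.1 ((PySem.List.pyGet? (PySem.Str.split₀ line) 1).getD "") = true then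
    (st.1, st.2 + 1)
  else st

-- one reverse-pass step: count the jump against the labels seen so far, then
-- "if line.strip().startswith('LABEL') and len(parts) > 1: later_labels.add(parts[1])"
def pvStepB (st : PySem.Set String × Int) (line : String) : PySem.Set String × Int :=
  if PySem.Str.startswith (PySem.Str.strip line) "LABEL" ∧
      2 ≤ (PySem.Str.split₀ (PySem.Str.strip line)).length then
    (PySem.Set.add (pvCountB st line).1
       ((PySem.List.pyGet? (PySem.Str.split₀ (PySem.Str.strip line)) 1).getD ""),
     (pvCountB st line).2)
  else pvCountB st line

def count_forward_jumps_alt (source_code : List String) : Int :=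
  (source_code.reverse.foldl pvStepB (PySem.Set.empty, 0)).2

-- ===== PRECONDITION & SPEC =====
-- shape abbreviations used by Pre_ (read off a single line, no computation of either output)
def pvIsJump (l : String) : Prop := (PySem.Str.split₀ l).headD "" ∈ pvInstrsA
def pvIsShortLabel (l : String) : Prop :=
  PySem.Str.startswith (PySem.Str.strip l) "LABEL" = true ∧
  (PySem.Str.split₀ (PySem.Str.strip l)).length < 2
def pvLongMatch (t : String) (l : String) : Prop :=
  PySem.Str.startswith (PySem.Str.strip l) "LABEL" = true ∧
  2 ≤ (PySem.Str.split₀ (PySem.Str.strip l)).length ∧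
  (PySem.List.pyGet? (PySem.Str.split₀ (PySem.Str.strip l)) 1).getD "" = t

-- Pre_ holds exactly where Python A returns: it excludes (1) a jump-instruction line with
-- fewer than two tokens (A raises IndexError on tokens[1]) and (2) a nameless LABEL line
-- that some jump's forward scan reaches before finding its target (A raises IndexError on
-- next_line.strip().split()[1]); everywhere A returns a value, Pre_ holds.
def Pre_count_forward_jumps (source_code : List String) : Prop :=
  (∀ line ∈ source_code, pvIsJump line → 2 ≤ (PySem.Str.split₀ line).length) ∧
  (∀ j ∈ List.range source_code.length, pvIsShortLabel (source_code.getD j "") →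
    ∀ i ∈ List.range j, pvIsJump (source_code.getD i "") →
      ∃ k ∈ List.range j, i < k ∧
        pvLongMatch ((PySem.List.pyGet? (PySem.Str.split₀ (source_code.getD i "")) 1).getD "")
          (source_code.getD k ""))

instance (source_code : List String) : Decidable (Pre_count_forward_jumps source_code) := by
  unfold Pre_count_forward_jumps pvIsJump pvIsShortLabel pvLongMatch; infer_instance

def pvWitness_count_forward_jumps : List String :=
  ["JUMP there", "LABEL here", "JUMP here", "MOVE x y", "LABEL there"]

def Spec_count_forward_jumps (source_code : List String) (out : Int) : Prop := out = count_forward_jumps_alt source_code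
instance (source_code : List String) (out : Int) : Decidable (Spec_count_forward_jumps source_code out) := by unfold Spec_count_forward_jumps; infer_instance

-- ===== CLAIM (what is proved, stated in full; the proofs are below) =====
def Claim_equal_count_forward_jumps : Prop := ∀ (source_code : List String), Dom_count_forward_jumps source_code → Pre_count_forward_jumps source_code → Spec_count_forward_jumps source_code (count_forward_jumps source_code)
-- ===== LEMMAS AND PROOFS =====

def pvIsLabel (l : String) : Bool := PySem.Str.startswith (PySem.Str.strip l) "LABEL"
def pvIsLong (l : String) : Bool := decide (2 ≤ (PySem.Str.split₀ (PySem.Str.strip l)).length)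
def pvLName (l : String) : String :=
  (PySem.List.pyGet? (PySem.Str.split₀ (PySem.Str.strip l)) 1).getD ""
def pvTarget (l : String) : String := (PySem.List.pyGet? (PySem.Str.split₀ l) 1).getD ""

-- label-presence over a suffix, as A sees it (every LABEL line, default name "")
def pvHasLab (name : String) (xs : List String) : Bool :=
  xs.any (fun l => pvIsLabel l && (name == pvLName l))
-- label-presence as B records it (only LABEL lines with a name)
def pvHasLabL (name : String) (xs : List String) : Bool :=
  xs.any (fun l => pvIsLabel l && pvIsLong l && (name == pvLName l))

theorem pvHasLab_nil (name : String) : pvHasLab name [] = false := rfl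

theorem pvHasLab_cons (name x : String) (t : List String) :
    pvHasLab name (x :: t) = ((pvIsLabel x && (name == pvLName x)) || pvHasLab name t) := by
  simp only [pvHasLab, List.any_cons]

theorem pvHasLabL_cons (name x : String) (t : List String) :
    pvHasLabL name (x :: t) = ((pvIsLabel x && pvIsLong x && (name == pvLName x)) || pvHasLabL name t) := by
  simp only [pvHasLabL, List.any_cons]

-- the A-side specification: a structural count over the list, all LABEL lines visible
def pvSpecCount : List String → Int
  | [] => 0
  | x :: s =>
    (if PySem.Str.split₀ x ≠ [] ∧ (PySem.Str.split₀ x).headD "" ∈ pvInstrsA ∧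
        pvHasLab (pvTarget x) s = true then 1 else 0) + pvSpecCount s

-- the B-side specification: same count, only named LABEL lines visible
def pvSpecCountL : List String → Int
  | [] => 0
  | x :: s =>
    (if PySem.Str.split₀ x ≠ [] ∧ (PySem.Str.split₀ x).headD "" ∈ pvInstrsA ∧
        pvHasLabL (pvTarget x) s = true then 1 else 0) + pvSpecCountL s

theorem pvInnerA_eq (lab : String) (rest : List String) (c : Int) :
    pvInnerA lab rest c = c + (if pvHasLab lab rest then 1 else 0) := by
  induction rest generalizing c with
  | nil => rw [pvHasLab_nil]; simp [pvInnerA]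
  | cons x t ih =>
    rw [pvInnerA, pvHasLab_cons]
    by_cases hl : pvIsLabel x = true
    · rw [if_pos (show PySem.Str.startswith (PySem.Str.strip x) "LABEL" = true from hl), hl]
      by_cases he : (lab == pvLName x) = true
      · rw [if_pos (show (lab == (PySem.List.pyGet? (PySem.Str.split₀ (PySem.Str.strip x)) 1).getD "") = true from he), he]
        simp
      · have he' : ¬ (lab == (PySem.List.pyGet? (PySem.Str.split₀ (PySem.Str.strip x)) 1).getD "") = true := he
        rw [if_neg he', ih]
        simp only [Bool.not_eq_true] at he
        rw [he]
        simp
    · have hl' : ¬ PySem.Str.startswith (PySem.Str.strip x) "LABEL" = true := hl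
      rw [if_neg hl', ih]
      simp only [Bool.not_eq_true] at hl
      rw [hl]
      simp

theorem pvA_eq_spec_aux (suf pre : List String) (c : Int) :
    (PySem.List.enumerate suf (pre.length : Int)).foldl (fun count p =>
      if PySem.Str.split₀ p.2 ≠ [] ∧ (PySem.Str.split₀ p.2).headD "" ∈ pvInstrsA then
        pvInnerA ((PySem.List.pyGet? (PySem.Str.split₀ p.2) 1).getD "")
          (PySem.List.slice (pre ++ suf) (some (p.1 + 1)) none) count
      else count) c = c + pvSpecCount suf := by
  induction suf generalizing pre c with
  | nil => simp [PySem.List.enumerate_nil, pvSpecCount]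
  | cons x t ih =>
    rw [PySem.List.enumerate_cons, List.foldl_cons]
    have hslice : PySem.List.slice (pre ++ x :: t) (some ((pre.length : Int) + 1)) none = t := by
      have h1 : ((pre.length : Int) + 1) = ((pre.length + 1 : Nat) : Int) := by push_cast; ring
      rw [h1, PySem.List.slice_from_natCast]
      have h2 : pre ++ x :: t = (pre ++ [x]) ++ t := by simp
      rw [h2, List.drop_append_of_le_length (by simp)]
      simp
    have hpre1 : ((pre.length : Int) + 1) = (((pre ++ [x]).length : Nat) : Int) := by
      simp
    have happ : pre ++ x :: t = (pre ++ [x]) ++ t := by simp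
    have hrec : ∀ c' : Int,
        (PySem.List.enumerate t ((pre.length : Int) + 1)).foldl (fun count p =>
          if PySem.Str.split₀ p.2 ≠ [] ∧ (PySem.Str.split₀ p.2).headD "" ∈ pvInstrsA then
            pvInnerA ((PySem.List.pyGet? (PySem.Str.split₀ p.2) 1).getD "")
              (PySem.List.slice (pre ++ x :: t) (some (p.1 + 1)) none) count
          else count) c' = c' + pvSpecCount t := by
      intro c'
      rw [hpre1, happ]
      exact ih (pre ++ [x]) c'
    by_cases hj : PySem.Str.split₀ x ≠ [] ∧ (PySem.Str.split₀ x).headD "" ∈ pvInstrsA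
    · rw [if_pos hj, hslice, pvInnerA_eq, hrec]
      simp only [pvSpecCount, pvTarget]
      by_cases hh : pvHasLab ((PySem.List.pyGet? (PySem.Str.split₀ x) 1).getD "") t = true
      · rw [if_pos hh, if_pos ⟨hj.1, hj.2, hh⟩]; ring
      · rw [if_neg hh, if_neg (by tauto)]; ring
    · rw [if_neg hj, hrec]
      simp only [pvSpecCount]
      rw [if_neg (by tauto)]
      ring

theorem pvA_eq_spec (src : List String) : count_forward_jumps src = pvSpecCount src := by
  have h := pvA_eq_spec_aux src [] 0
  simpa [count_forward_jumps] using h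

-- B-side invariant over the reverse fold
def pvFoldB (s : List String) : PySem.Set String × Int :=
  s.reverse.foldl pvStepB (PySem.Set.empty, 0)

theorem pvFoldB_cons (x : String) (s : List String) :
    pvFoldB (x :: s) = pvStepB (pvFoldB s) x := by
  simp [pvFoldB, List.reverse_cons, List.foldl_append]

theorem pvFoldB_invariant (s : List String) :
    (pvFoldB s).2 = pvSpecCountL s ∧
    ∀ name : String, (name ∈ (pvFoldB s).1 ↔ pvHasLabL name s = true) := by
  induction s with
  | nil =>
    refine ⟨rfl, ?_⟩
    intro name
    simp [pvFoldB, PySem.Set.empty, pvHasLabL]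
  | cons x t ih =>
    obtain ⟨ihc, ihs⟩ := ih
    rw [pvFoldB_cons]
    -- the jump-counting phase
    have hcount : (pvCountB (pvFoldB t) x).1 = (pvFoldB t).1 ∧
        (pvCountB (pvFoldB t) x).2 =
          (if PySem.Str.split₀ x ≠ [] ∧ (PySem.Str.split₀ x).headD "" ∈ pvInstrsA ∧
              pvHasLabL (pvTarget x) t = true then 1 else 0) + pvSpecCountL t := by
      unfold pvCountB
      have hcond : (PySem.Str.split₀ x ≠ [] ∧ (PySem.Str.split₀ x).headD "" ∈ pvInstrsB ∧
          PySem.Set.contains (pvFoldB t).1 ((PySem.List.pyGet? (PySem.Str.split₀ x) 1).getD "") = true)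
          ↔ (PySem.Str.split₀ x ≠ [] ∧ (PySem.Str.split₀ x).headD "" ∈ pvInstrsA ∧
              pvHasLabL (pvTarget x) t = true) := by
        rw [show pvInstrsB = pvInstrsA from rfl, PySem.Set.contains_iff, ihs, pvTarget]
      by_cases hc : PySem.Str.split₀ x ≠ [] ∧ (PySem.Str.split₀ x).headD "" ∈ pvInstrsA ∧
          pvHasLabL (pvTarget x) t = true
      · rw [if_pos (hcond.mpr hc), if_pos hc]
        refine ⟨rfl, ?_⟩
        show (pvFoldB t).2 + 1 = 1 + pvSpecCountL t
        rw [ihc]; ring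
      · rw [if_neg (fun h => hc (hcond.mp h)), if_neg hc]
        refine ⟨rfl, ?_⟩
        show (pvFoldB t).2 = 0 + pvSpecCountL t
        rw [ihc]; ring
    unfold pvStepB
    by_cases hl : PySem.Str.startswith (PySem.Str.strip x) "LABEL" ∧
        2 ≤ (PySem.Str.split₀ (PySem.Str.strip x)).length
    · rw [if_pos hl]
      have hlb : pvIsLabel x = true := hl.1
      have hlg : pvIsLong x = true := by simp [pvIsLong, hl.2]
      constructor
      · show (pvCountB (pvFoldB t) x).2 = pvSpecCountL (x :: t)
        rw [hcount.2]
        simp only [pvSpecCountL]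
      · intro name
        show name ∈ PySem.Set.add (pvCountB (pvFoldB t) x).1
          ((PySem.List.pyGet? (PySem.Str.split₀ (PySem.Str.strip x)) 1).getD "") ↔ _
        rw [hcount.1, PySem.Set.mem_add, pvHasLabL_cons, hlb, hlg]
        rw [show ((PySem.List.pyGet? (PySem.Str.split₀ (PySem.Str.strip x)) 1).getD "") = pvLName x from rfl]
        simp only [Bool.true_and, Bool.and_self, Bool.or_eq_true, beq_iff_eq]
        rw [ihs name]
        exact or_comm
    · rw [if_neg hl]
      have hshort : (pvIsLabel x && pvIsLong x) = false := by
        by_cases hb : pvIsLabel x = true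
        · have : ¬ 2 ≤ (PySem.Str.split₀ (PySem.Str.strip x)).length := fun h => hl ⟨hb, h⟩
          simp [pvIsLong, hb, this]
        · simp [Bool.not_eq_true] at hb
          simp [hb]
      constructor
      · rw [hcount.2]
        simp only [pvSpecCountL]
      · intro name
        rw [hcount.1, ihs name, pvHasLabL_cons, hshort]
        simp

theorem pvB_eq_spec (src : List String) : count_forward_jumps_alt src = pvSpecCountL src := by
  have h := (pvFoldB_invariant src).1
  simpa [count_forward_jumps_alt, pvFoldB] using h

-- under the no-escaping-scan condition, A's label view and B's label view agree
theorem pvHasLab_eq_long (t : String) (s : List String)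
    (H : ∀ j, j < s.length → pvIsShortLabel (s.getD j "") →
      ∃ k, k < j ∧ pvLongMatch t (s.getD k "")) :
    pvHasLab t s = pvHasLabL t s := by
  rw [Bool.eq_iff_iff]
  constructor
  · intro hA
    simp only [pvHasLab, List.any_eq_true, Bool.and_eq_true, beq_iff_eq] at hA
    obtain ⟨l, hm, hlb, hn⟩ := hA
    by_cases hlong : 2 ≤ (PySem.Str.split₀ (PySem.Str.strip l)).length
    · -- l itself is a named LABEL matching t
      simp only [pvHasLabL, List.any_eq_true, Bool.and_eq_true, beq_iff_eq]
      exact ⟨l, hm, ⟨hlb, by simp [pvIsLong, hlong]⟩, hn⟩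
    · -- l is nameless: H supplies a named matching label elsewhere in s
      obtain ⟨j, hj, hgj⟩ := List.mem_iff_getElem.mp hm
      have hshort : pvIsShortLabel (s.getD j "") := by
        rw [List.getD_eq_getElem s "" hj, hgj]
        exact ⟨hlb, by omega⟩
      obtain ⟨k, hk, hkm⟩ := H j hj hshort
      have hks : s.getD k "" ∈ s := by
        rw [List.getD_eq_getElem s "" (by omega)]
        exact List.getElem_mem _
      simp only [pvHasLabL, List.any_eq_true, Bool.and_eq_true, beq_iff_eq]
      refine ⟨s.getD k "", hks, ⟨hkm.1, ?_⟩, ?_⟩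
      · exact decide_eq_true hkm.2.1
      · exact (hkm.2.2).symm
  · intro hB
    simp only [pvHasLabL, List.any_eq_true, Bool.and_eq_true, beq_iff_eq] at hB
    obtain ⟨l, hm, ⟨hlb, _⟩, hn⟩ := hB
    simp only [pvHasLab, List.any_eq_true, Bool.and_eq_true, beq_iff_eq]
    exact ⟨l, hm, hlb, hn⟩

-- Pre_'s scan condition restricts to the tail
theorem pvH_tail (x : String) (s : List String)
    (H : ∀ j, j < (x :: s).length → pvIsShortLabel ((x :: s).getD j "") →
      ∀ i, i < j → pvIsJump ((x :: s).getD i "") →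
        ∃ k, k < j ∧ i < k ∧
          pvLongMatch ((PySem.List.pyGet? (PySem.Str.split₀ ((x :: s).getD i "")) 1).getD "")
            ((x :: s).getD k "")) :
    ∀ j, j < s.length → pvIsShortLabel (s.getD j "") →
      ∀ i, i < j → pvIsJump (s.getD i "") →
        ∃ k, k < j ∧ i < k ∧
          pvLongMatch ((PySem.List.pyGet? (PySem.Str.split₀ (s.getD i "")) 1).getD "")
            (s.getD k "") := by
  intro j hj hs i hi hji
  have h1 : (x :: s).getD (j + 1) "" = s.getD j "" := by simp
  have h2 : (x :: s).getD (i + 1) "" = s.getD i "" := by simp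
  obtain ⟨k, hk1, hk2, hk3⟩ := H (j + 1) (by simp; omega) (by rw [h1]; exact hs)
    (i + 1) (by omega) (by rw [h2]; exact hji)
  refine ⟨k - 1, by omega, by omega, ?_⟩
  have h3 : (x :: s).getD k "" = s.getD (k - 1) "" := by
    cases k with
    | zero => omega
    | succ k' => simp
  rw [h2, h3] at hk3
  exact hk3

theorem pvSpec_eq (s : List String)
    (H : ∀ j, j < s.length → pvIsShortLabel (s.getD j "") →
      ∀ i, i < j → pvIsJump (s.getD i "") →
        ∃ k, k < j ∧ i < k ∧
          pvLongMatch ((PySem.List.pyGet? (PySem.Str.split₀ (s.getD i "")) 1).getD "")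
            (s.getD k "")) :
    pvSpecCount s = pvSpecCountL s := by
  induction s with
  | nil => rfl
  | cons x t ih =>
    have Ht := pvH_tail x t H
    simp only [pvSpecCount, pvSpecCountL]
    rw [ih Ht]
    by_cases hj : PySem.Str.split₀ x ≠ [] ∧ (PySem.Str.split₀ x).headD "" ∈ pvInstrsA
    · -- x is a jump: labels visible to A and to B in t coincide for its target
      have Hx : ∀ j, j < t.length → pvIsShortLabel (t.getD j "") →
          ∃ k, k < j ∧ pvLongMatch (pvTarget x) (t.getD k "") := by
        intro j hjl hsl
        have h1 : (x :: t).getD (j + 1) "" = t.getD j "" := by simp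
        obtain ⟨k, hk1, hk2, hk3⟩ := H (j + 1) (by simp; omega) (by rw [h1]; exact hsl)
          0 (by omega) (by simpa [pvIsJump] using hj.2)
        have h3 : (x :: t).getD k "" = t.getD (k - 1) "" := by
          cases k with
          | zero => omega
          | succ k' => simp
        refine ⟨k - 1, by omega, ?_⟩
        rw [h3] at hk3
        simpa [pvTarget] using hk3
      rw [pvHasLab_eq_long (pvTarget x) t Hx]
    · rw [if_neg (by tauto), if_neg (by tauto)]

-- ===== VERDICT (by name: the statement is the Claim_ definition above) =====
theorem count_forward_jumps_spec : Claim_equal_count_forward_jumps := by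
  intro src _ hpre
  unfold Spec_count_forward_jumps
  rw [pvA_eq_spec, pvB_eq_spec]
  refine pvSpec_eq src ?_
  intro j hj hs i hi hji
  obtain ⟨k, hk, hik, hkm⟩ := hpre.2 j (List.mem_range.mpr hj) hs i (List.mem_range.mpr hi) hji
  exact ⟨k, List.mem_range.mp hk, hik, hkm⟩
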